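-- pv_equiv track=rewrite | github.com/drakeaxelrod/totem | tools/gen_svg_layers.py | tokenize_bindings
-- ===== SOURCE A (Python) =====
-- def tokenize_bindings(bindings_str):
--     """Split a ZMK bindings string into individual binding strings.
--
--     Handles nested parentheses in arguments like LS(LC(LA(LGUI))).
--     """
--     bindings = []
--     i = 0
--     s = bindings_str.strip()
--     while i < len(s):
--         if s[i] == "&":
--             # Find the start of this binding
--             j = i + 1
--             # Collect tokens until next & or end
--             depth = 0
--             while j < len(s):
--                 if s[j] == "(":
--                     depth += 1
--                 elif s[j] == ")":
--                     depth -= 1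
--                 elif s[j] == "&" and depth == 0:
--                     break
--                 j += 1
--             bindings.append(s[i + 1 : j].strip())
--             i = j
--         else:
--             i += 1
--     return bindings
-- ===== SOURCE B (Python) =====
-- def tokenize_bindings(bindings_str):
--     """Split a ZMK bindings string into individual binding strings.
--
--     Single flat pass with a depth counter and an accumulating buffer,
--     instead of re-scanning slices between '&' positions.
--     """
--     out = []
--     started = False
--     depth = 0
--     buf = []
--     for c in bindings_str.strip():
--         if not started:
--             if c == "&":
--                 started = True
--                 depth = 0
--                 buf = []
--         elif c == "&" and depth == 0:
--             out.append("".join(buf).strip())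
--             buf = []
--         elif c == "(":
--             depth += 1
--             buf.append(c)
--         elif c == ")":
--             depth -= 1
--             buf.append(c)
--         else:
--             buf.append(c)
--     if started:
--         out.append("".join(buf).strip())
--     return out
-- ===== Notes on version B (the rewrite author's own statement) =====
-- stated objective: simpler
-- what changed: Replaces A's nested scan (an inner while loop that re-scans ahead to the next top-level ampersand and then slices the string) by one flat pass holding a depth counter, a started flag and an accumulating character buffer that is flushed at each top-level ampersand and at the end.
import Mathlib
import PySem

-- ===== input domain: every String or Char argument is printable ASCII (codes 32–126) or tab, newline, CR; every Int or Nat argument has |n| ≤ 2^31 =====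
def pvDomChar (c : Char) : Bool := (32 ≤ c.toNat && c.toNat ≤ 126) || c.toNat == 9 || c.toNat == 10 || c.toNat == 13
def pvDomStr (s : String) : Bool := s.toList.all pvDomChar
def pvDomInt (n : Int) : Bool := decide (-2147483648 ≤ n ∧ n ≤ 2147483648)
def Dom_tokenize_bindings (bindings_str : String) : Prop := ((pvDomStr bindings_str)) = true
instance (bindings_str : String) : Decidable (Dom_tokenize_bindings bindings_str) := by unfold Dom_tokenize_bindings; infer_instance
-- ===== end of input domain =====

-- B replaces A's nested scan (inner while loop re-scanning to the next top-level '&', then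
-- slicing) by one flat pass with a depth counter and an accumulating buffer (objective: simpler).

-- ===== PORT A =====
-- inner while loop of A: advance j until the next '&' at depth 0, or the end of the string.
-- The loop advances j by 1 each step, so fuel = s.length is always enough (a totality guard only).
def pvInnerA (s : List Char) : Nat → Nat → Int → Nat
  | 0, j, _ => j
  | fuel+1, j, depth =>
    if h : j < s.length then
      if s[j] = '(' then pvInnerA s fuel (j+1) (depth+1)
      else if s[j] = ')' then pvInnerA s fuel (j+1) (depth-1)
      else if s[j] = '&' ∧ depth = 0 then j
      else pvInnerA s fuel (j+1) depth
    else j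

-- outer while loop of A (s[i+1:j].strip() ported as slice + Chars.strip on the code points);
-- i strictly increases each iteration, so fuel = s.length + 1 is always enough (totality guard).
def pvOuterA (s : List Char) : Nat → Nat → List String → List String
  | 0, _, acc => acc
  | fuel+1, i, acc =>
    if h : i < s.length then
      if s[i] = '&' then
        let j := pvInnerA s s.length (i+1) 0
        pvOuterA s fuel j (acc ++ [String.ofList (PySem.Chars.strip (PySem.List.slice s (some ((i:Int)+1)) (some (j:Int))))])
      else pvOuterA s fuel (i+1) acc
    else acc

def tokenize_bindings (bindings_str : String) : List String :=
  pvOuterA (PySem.Str.strip bindings_str).toList ((PySem.Str.strip bindings_str).toList.length + 1) 0 []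

-- ===== PORT B =====
-- the for-loop of B over the stripped characters, with state (started, depth, buf, acc);
-- the trailing 'if started: flush' is the [] case
def pvGoB (cs : List Char) (started : Bool) (depth : Int) (buf : List Char) (acc : List String) : List String :=
  match cs with
  | [] => if started then acc ++ [String.ofList (PySem.Chars.strip buf)] else acc
  | c :: rest =>
    if !started then
      if c = '&' then pvGoB rest true 0 [] acc else pvGoB rest started depth buf acc
    else if c = '&' ∧ depth = 0 then pvGoB rest started depth [] (acc ++ [String.ofList (PySem.Chars.strip buf)])
    else if c = '(' then pvGoB rest started (depth+1) (buf ++ [c]) acc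
    else if c = ')' then pvGoB rest started (depth-1) (buf ++ [c]) acc
    else pvGoB rest started depth (buf ++ [c]) acc

def tokenize_bindings_alt (bindings_str : String) : List String :=
  pvGoB (PySem.Str.strip bindings_str).toList false 0 [] []

-- ===== PRECONDITION & SPEC =====
def Spec_tokenize_bindings (bindings_str : String) (out : List String) : Prop := out = tokenize_bindings_alt bindings_str
instance (bindings_str : String) (out : List String) : Decidable (Spec_tokenize_bindings bindings_str out) := by unfold Spec_tokenize_bindings; infer_instance

-- ===== CLAIM (what is proved, stated in full; the proofs are below) =====
def Claim_equal_tokenize_bindings : Prop := ∀ (bindings_str : String), Dom_tokenize_bindings bindings_str → Spec_tokenize_bindings bindings_str (tokenize_bindings bindings_str)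

-- ===== LEMMAS AND PROOFS =====

theorem pvInnerA_stop (s : List Char) (fuel j : Nat) (d : Int) (hj : ¬ j < s.length) :
    pvInnerA s fuel j d = j := by
  cases fuel <;> simp [pvInnerA, hj]

theorem pvInnerA_ge (s : List Char) : ∀ (fuel j : Nat) (d : Int), j ≤ pvInnerA s fuel j d := by
  intro fuel
  induction fuel with
  | zero => intro j d; simp [pvInnerA]
  | succ f ih =>
    intro j d
    rw [pvInnerA]
    by_cases h : j < s.length
    · simp only [dif_pos h]
      split_ifs with h2 h3 h4
      · have := ih (j+1) (d+1); omega
      · have := ih (j+1) (d-1); omega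
      · omega
      · have := ih (j+1) d; omega
    · simp [dif_neg h]

theorem pvInnerA_le (s : List Char) : ∀ (fuel j : Nat) (d : Int), j ≤ s.length →
    pvInnerA s fuel j d ≤ s.length := by
  intro fuel
  induction fuel with
  | zero => intro j d hj; simpa [pvInnerA] using hj
  | succ f ih =>
    intro j d hj
    rw [pvInnerA]
    by_cases h : j < s.length
    · simp only [dif_pos h]
      split_ifs with h2 h3 h4
      · exact ih (j+1) (d+1) (by omega)
      · exact ih (j+1) (d-1) (by omega)
      · omega
      · exact ih (j+1) d (by omega)
    · simpa [dif_neg h] using hj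

theorem pvInnerA_char (s : List Char) : ∀ (fuel j : Nat) (d : Int), s.length - j ≤ fuel →
    pvInnerA s fuel j d < s.length → s[pvInnerA s fuel j d]? = some '&' := by
  intro fuel
  induction fuel with
  | zero =>
    intro j d hf hlt
    rw [pvInnerA_stop s 0 j d (by omega)] at hlt
    omega
  | succ f ih =>
    intro j d hf
    rw [pvInnerA]
    by_cases h : j < s.length
    · simp only [dif_pos h]
      split_ifs with h2 h3 h4
      · exact ih (j+1) (d+1) (by omega)
      · exact ih (j+1) (d-1) (by omega)
      · intro _
        simp [List.getElem?_eq_getElem h]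
        exact h4.1
      · exact ih (j+1) d (by omega)
    · simp only [dif_neg h]
      intro hlt; omega

theorem pvInnerA_fuel_succ (s : List Char) : ∀ (fuel j : Nat) (d : Int), s.length - j ≤ fuel →
    pvInnerA s (fuel+1) j d = pvInnerA s fuel j d := by
  intro fuel
  induction fuel with
  | zero =>
    intro j d hf
    rw [pvInnerA_stop s 1 j d (by omega), pvInnerA_stop s 0 j d (by omega)]
  | succ f ih =>
    intro j d hf
    conv_lhs => rw [pvInnerA]
    conv_rhs => rw [pvInnerA]
    by_cases h : j < s.length
    · simp only [dif_pos h]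
      split_ifs with h2 h3 h4
      · exact ih (j+1) (d+1) (by omega)
      · exact ih (j+1) (d-1) (by omega)
      · rfl
      · exact ih (j+1) d (by omega)
    · simp only [dif_neg h]

-- one unfolding step of A's inner loop at its canonical fuel s.length
theorem pvInnerA_unfold (s : List Char) (j : Nat) (d : Int) (hj : j < s.length) :
    pvInnerA s s.length j d =
      if s[j] = '(' then pvInnerA s s.length (j+1) (d+1)
      else if s[j] = ')' then pvInnerA s s.length (j+1) (d-1)
      else if s[j] = '&' ∧ d = 0 then j
      else pvInnerA s s.length (j+1) d := by
  obtain ⟨m, hm⟩ : ∃ m, s.length = m + 1 := ⟨s.length - 1, by omega⟩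
  have hup : ∀ d' : Int, pvInnerA s m (j+1) d' = pvInnerA s s.length (j+1) d' := by
    intro d'
    conv_rhs => rw [hm]
    exact (pvInnerA_fuel_succ s m (j+1) d' (by omega)).symm
  conv_lhs => rw [hm, pvInnerA]
  simp only [dif_pos hj, hup]

theorem pvTakeShift (c : Char) (l : List Char) (j k : Nat) (hk : j + 1 ≤ k) :
    (c :: l).take (k - j) = c :: l.take (k - (j+1)) := by
  have hkk : k - j = (k - (j+1)) + 1 := by omega
  rw [hkk, List.take_succ_cons]

-- B's started-state run over s.drop j: skip to A's inner-loop stopping point k, flushing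
-- buf ++ s[j:k], and continue (or finish, if the string ends first)
theorem pvGoB_inner (s : List Char) : ∀ (n j : Nat), s.length - j = n → j ≤ s.length →
    ∀ (d : Int) (buf : List Char) (acc : List String),
    pvGoB (s.drop j) true d buf acc =
      (if pvInnerA s s.length j d < s.length then
         pvGoB (s.drop (pvInnerA s s.length j d + 1)) true 0 []
           (acc ++ [String.ofList (PySem.Chars.strip (buf ++ (s.drop j).take (pvInnerA s s.length j d - j)))])
       else acc ++ [String.ofList (PySem.Chars.strip (buf ++ s.drop j))]) := by
  intro n
  induction n with
  | zero =>
    intro j hn hj d buf acc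
    have hjl : j = s.length := by omega
    rw [pvInnerA_stop s s.length j d (by omega)]
    simp [hjl, pvGoB]
  | succ n ih =>
    intro j hn hj d buf acc
    have hjl : j < s.length := by omega
    rw [List.drop_eq_getElem_cons hjl]
    by_cases hamp : s[j] = '&' ∧ d = 0
    · obtain ⟨hc, hd⟩ := hamp
      subst hd
      have hki : pvInnerA s s.length j 0 = j := by
        rw [pvInnerA_unfold s j 0 hjl]; simp [hc]
      rw [hki]
      simp [pvGoB, hc, hjl]
    · by_cases hp : s[j] = '('
      · have hki : pvInnerA s s.length j d = pvInnerA s s.length (j+1) (d+1) := by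
          rw [pvInnerA_unfold s j d hjl]; simp [hp]
        have hlhs : pvGoB (s[j] :: s.drop (j+1)) true d buf acc
            = pvGoB (s.drop (j+1)) true (d+1) (buf ++ [s[j]]) acc := by
          simp [pvGoB, hp]
        rw [hlhs, ih (j+1) (by omega) (by omega) (d+1) (buf ++ [s[j]]) acc, hki]
        have hge := pvInnerA_ge s s.length (j+1) (d+1)
        by_cases hkl : pvInnerA s s.length (j+1) (d+1) < s.length
        · simp only [if_pos hkl, pvTakeShift s[j] (s.drop (j+1)) j (pvInnerA s s.length (j+1) (d+1)) hge]
          simp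
        · simp only [if_neg hkl]
          simp
      · by_cases hq : s[j] = ')'
        · have hki : pvInnerA s s.length j d = pvInnerA s s.length (j+1) (d-1) := by
            rw [pvInnerA_unfold s j d hjl]; simp [hq]
          have hlhs : pvGoB (s[j] :: s.drop (j+1)) true d buf acc
              = pvGoB (s.drop (j+1)) true (d-1) (buf ++ [s[j]]) acc := by
            simp [pvGoB, hq]
          rw [hlhs, ih (j+1) (by omega) (by omega) (d-1) (buf ++ [s[j]]) acc, hki]
          have hge := pvInnerA_ge s s.length (j+1) (d-1)
          by_cases hkl : pvInnerA s s.length (j+1) (d-1) < s.length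
          · simp only [if_pos hkl, pvTakeShift s[j] (s.drop (j+1)) j (pvInnerA s s.length (j+1) (d-1)) hge]
            simp
          · simp only [if_neg hkl]
            simp
        · have hki : pvInnerA s s.length j d = pvInnerA s s.length (j+1) d := by
            rw [pvInnerA_unfold s j d hjl]; simp [hp, hq, hamp]
          have hlhs : pvGoB (s[j] :: s.drop (j+1)) true d buf acc
              = pvGoB (s.drop (j+1)) true d (buf ++ [s[j]]) acc := by
            simp [pvGoB, hp, hq, hamp]
          rw [hlhs, ih (j+1) (by omega) (by omega) d (buf ++ [s[j]]) acc, hki]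
          have hge := pvInnerA_ge s s.length (j+1) d
          by_cases hkl : pvInnerA s s.length (j+1) d < s.length
          · simp only [if_pos hkl, pvTakeShift s[j] (s.drop (j+1)) j (pvInnerA s s.length (j+1) d) hge]
            simp
          · simp only [if_neg hkl]
            simp

theorem pvOuterA_stop (s : List Char) (fuel i : Nat) (acc : List String) (hi : ¬ i < s.length) :
    pvOuterA s fuel i acc = acc := by
  cases fuel <;> simp [pvOuterA, hi]

-- A's outer loop at a position holding '&' equals B's started-state continuation
theorem pvOuterA_amp (s : List Char) : ∀ (fuel k : Nat) (acc : List String),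
    s.length - k < fuel → (hk : k < s.length) → s[k] = '&' →
    pvOuterA s fuel k acc = pvGoB (s.drop (k+1)) true 0 [] acc := by
  intro fuel
  induction fuel with
  | zero => intro k acc hf; omega
  | succ f ih =>
    intro k acc hf hk hc
    have hsl : PySem.List.slice s (some ((k:Int)+1)) (some ((pvInnerA s s.length (k+1) 0 : Nat) : Int))
        = (s.drop (k+1)).take (pvInnerA s s.length (k+1) 0 - (k+1)) := by
      have hcast : ((k:Int)+1) = (((k+1 : Nat)) : Int) := by push_cast; ring
      rw [hcast, PySem.List.slice_natCast]
    rw [pvOuterA]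
    simp only [dif_pos hk, if_pos hc]
    rw [pvGoB_inner s (s.length - (k+1)) (k+1) rfl (by omega) 0 [] acc, hsl]
    have hge := pvInnerA_ge s s.length (k+1) 0
    by_cases hkl : pvInnerA s s.length (k+1) 0 < s.length
    · rw [if_pos hkl]
      have hc2 : s[pvInnerA s s.length (k+1) 0] = '&' := by
        have := pvInnerA_char s s.length (k+1) 0 (by omega) hkl
        rwa [List.getElem?_eq_getElem hkl, Option.some_inj] at this
      rw [ih (pvInnerA s s.length (k+1) 0) _ (by omega) hkl hc2]
      simp
    · rw [if_neg hkl]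
      have hle := pvInnerA_le s s.length (k+1) 0 (by omega)
      have hklen : pvInnerA s s.length (k+1) 0 = s.length := by omega
      rw [pvOuterA_stop s f _ _ (by omega)]
      have htk : (s.drop (k+1)).take (pvInnerA s s.length (k+1) 0 - (k+1)) = s.drop (k+1) := by
        rw [hklen]
        exact List.take_of_length_le (by simp)
      rw [htk]
      simp

-- A's outer loop equals B's not-started-state run
theorem pvOuterA_eq (s : List Char) : ∀ (fuel i : Nat) (acc : List String),
    s.length - i < fuel → i ≤ s.length →
    pvOuterA s fuel i acc = pvGoB (s.drop i) false 0 [] acc := by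
  intro fuel
  induction fuel with
  | zero => intro i acc hf; omega
  | succ f ih =>
    intro i acc hf hi
    by_cases hil : i < s.length
    · rw [List.drop_eq_getElem_cons hil]
      by_cases hc : s[i] = '&'
      · have hrhs : pvGoB (s[i] :: s.drop (i+1)) false 0 [] acc
            = pvGoB (s.drop (i+1)) true 0 [] acc := by
          simp [pvGoB, hc]
        rw [hrhs]
        exact pvOuterA_amp s (f+1) i acc hf hil hc
      · have hrhs : pvGoB (s[i] :: s.drop (i+1)) false 0 [] acc
            = pvGoB (s.drop (i+1)) false 0 [] acc := by
          simp [pvGoB, hc]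
        rw [hrhs, pvOuterA]
        rw [dif_pos hil, if_neg hc]
        exact ih (i+1) acc (by omega) (by omega)
    · rw [pvOuterA_stop s (f+1) i acc hil]
      have hieq : i = s.length := by omega
      simp [hieq, pvGoB]

-- ===== VERDICT (by name: the statement is the Claim_ definition above) =====
theorem tokenize_bindings_spec : Claim_equal_tokenize_bindings := by
  intro bs _
  unfold Spec_tokenize_bindings tokenize_bindings tokenize_bindings_alt
  simpa using pvOuterA_eq (PySem.Str.strip bs).toList ((PySem.Str.strip bs).toList.length + 1) 0 [] (by omega) (by omega)
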